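-- pv_equiv track=rewrite | github.com/bruntonspall/AdventOfCode2018 | day2/puzzle.py | count_boxids
-- ===== SOURCE A (Python) =====
-- import collections
--
-- def count_boxids(boxid):
--     twos = 0
--     threes = 0
--     counter = collections.Counter(boxid)
--     for k in counter:
--         if counter[k] == 2:
--             twos = 1
--         if counter[k] == 3:
--             threes = 1
--     return twos, threes
-- ===== SOURCE B (Python) =====
-- def count_boxids(boxid):
--     # sort the characters, then scan run lengths instead of building a Counter
--     groups = []
--     prev = None
--     run = 0
--     for ch in sorted(boxid):
--         if prev is not None and ch == prev:
--             run += 1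
--         else:
--             if prev is not None:
--                 groups.append(run)
--             prev = ch
--             run = 1
--     if prev is not None:
--         groups.append(run)
--     return (1 if 2 in groups else 0, 1 if 3 in groups else 0)
-- ===== Notes on version B (the rewrite author's own statement) =====
-- stated objective: alternative
-- what changed: Replaces the Counter frequency table and the loop over its keys by sorting the characters and scanning run lengths, then testing whether 2 or 3 occurs among the run lengths.
import Mathlib
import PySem

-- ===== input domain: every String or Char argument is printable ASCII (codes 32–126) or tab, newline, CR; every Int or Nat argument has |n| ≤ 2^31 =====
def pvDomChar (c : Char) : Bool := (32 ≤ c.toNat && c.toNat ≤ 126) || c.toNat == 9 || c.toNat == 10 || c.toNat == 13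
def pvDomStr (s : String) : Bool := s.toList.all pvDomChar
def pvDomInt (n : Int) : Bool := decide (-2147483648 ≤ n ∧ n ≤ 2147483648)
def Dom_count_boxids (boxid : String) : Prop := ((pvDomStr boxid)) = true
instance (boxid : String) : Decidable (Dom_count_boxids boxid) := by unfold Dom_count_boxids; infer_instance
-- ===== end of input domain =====

-- B replaces A's Counter-over-keys scan by sorting the characters and scanning run lengths; same results, alternative algorithm.


-- ===== PORT A =====
-- counter = collections.Counter(boxid); for k in counter: if counter[k]==2: twos=1; if counter[k]==3: threes=1
-- (counter[k] on a Counter is a lookup with default 0, hence getD … 0; every k iterated is a key)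
def count_boxids (boxid : String) : Int × Int :=
  let counter := PySem.Dict.counter boxid.toList
  counter.keys.foldl
    (fun (acc : Int × Int) k =>
      let twos := if counter.getD k 0 = 2 then 1 else acc.1
      let threes := if counter.getD k 0 = 3 then 1 else acc.2
      (twos, threes))
    (0, 0)

-- ===== PORT B =====
-- the body of Source B's loop over sorted(boxid): state = (groups, prev, run)
def pvStepB (s : List Int × Option Char × Int) (ch : Char) : List Int × Option Char × Int :=
  match s with
  | (groups, some p, run) =>
    if ch = p then (groups, some p, run + 1) else (groups ++ [run], some ch, 1)
  | (groups, none, _) => (groups, some ch, 1)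

-- the trailing 'if prev is not None: groups.append(run)'
def pvFinishB (s : List Int × Option Char × Int) : List Int :=
  match s.2.1 with
  | some _ => s.1 ++ [s.2.2]
  | none => s.1

def count_boxids_alt (boxid : String) : Int × Int :=
  let groups := pvFinishB
    ((PySem.List.sorted boxid.toList (fun c => c) false).foldl pvStepB ([], none, 0))
  ((if (2 : Int) ∈ groups then 1 else 0), (if (3 : Int) ∈ groups then 1 else 0))

-- ===== PRECONDITION & SPEC =====
def Spec_count_boxids (boxid : String) (out : Int × Int) : Prop := out = count_boxids_alt boxid
instance (boxid : String) (out : Int × Int) : Decidable (Spec_count_boxids boxid out) := by unfold Spec_count_boxids; infer_instance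

-- ===== CLAIM (what is proved, stated in full; the proofs are below) =====
def Claim_equal_count_boxids : Prop := ∀ (boxid : String), Dom_count_boxids boxid → Spec_count_boxids boxid (count_boxids boxid)

-- ===== LEMMAS AND PROOFS =====

-- the head step of A's flag fold, expressed on the if-condition
theorem flag_if_step (c : Char) (t : List Char) (f : Char → Int) (v a : Int) :
    (if ∃ k ∈ t, f k = v then (1 : Int) else if f c = v then 1 else a)
      = if ∃ k ∈ c :: t, f k = v then 1 else a := by
  by_cases h1 : ∃ k ∈ t, f k = v <;> by_cases h2 : f c = v <;>
    simp [List.mem_cons, h1, h2]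

-- A's fold over the keys only ever sets the flags to 1: its result is an existential test.
theorem foldA_char (l : List Char) (f : Char → Int) (acc : Int × Int) :
    l.foldl (fun (acc : Int × Int) k =>
      ((if f k = 2 then 1 else acc.1), (if f k = 3 then 1 else acc.2))) acc
    = ((if ∃ k ∈ l, f k = 2 then 1 else acc.1), (if ∃ k ∈ l, f k = 3 then 1 else acc.2)) := by
  induction l generalizing acc with
  | nil => simp
  | cons c t ih =>
    rw [List.foldl_cons, ih]
    rw [Prod.mk.injEq]
    exact ⟨flag_if_step c t f 2 acc.1, flag_if_step c t f 3 acc.2⟩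

-- run lengths of a list, starting inside a run of p whose current length is run
def rlFrom (p : Char) (run : Int) : List Char → List Int
  | [] => [run]
  | c :: t => if c = p then rlFrom p (run + 1) t else run :: rlFrom c 1 t

-- B's fold computes rlFrom
theorem foldB_eq_rlFrom (xs : List Char) (groups : List Int) (p : Char) (run : Int) :
    pvFinishB (xs.foldl pvStepB (groups, some p, run)) = groups ++ rlFrom p run xs := by
  induction xs generalizing groups p run with
  | nil => simp [pvFinishB, rlFrom]
  | cons c t ih =>
    by_cases h : c = p <;>
      simp [pvStepB, rlFrom, h, ih, List.append_assoc]

-- membership in rlFrom over a sorted tail: the head run plus counts of the other values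
theorem mem_rlFrom_sorted (xs : List Char) (p : Char) (run r : Int)
    (hs : (p :: xs).Pairwise (· ≤ ·)) :
    r ∈ rlFrom p run xs ↔ (r = run + xs.count p) ∨ ∃ c ∈ xs, c ≠ p ∧ r = (xs.count c : Int) := by
  induction xs generalizing p run with
  | nil => simp [rlFrom]
  | cons c t ih =>
    have hpc : p ≤ c := (List.pairwise_cons.1 hs).1 c (by simp)
    have hct : (c :: t).Pairwise (· ≤ ·) := (List.pairwise_cons.1 hs).2
    have hhead : (((c :: t).count c : Int)) = (t.count c : Int) + 1 := by simp
    by_cases h : c = p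
    · subst h
      have hih := ih c (run + 1) (hs.sublist (by simp))
      rw [show rlFrom c run (c :: t) = rlFrom c (run + 1) t from by simp [rlFrom], hih]
      constructor
      · rintro (hr | ⟨c', hc', hne, hr⟩)
        · left; rw [hhead]; omega
        · have hcnt : (((c :: t).count c' : Int)) = (t.count c' : Int) := by
            simp [Ne.symm hne]
          exact Or.inr ⟨c', List.mem_cons.2 (Or.inr hc'), hne, by rw [hcnt]; exact hr⟩
      · rintro (hr | ⟨c', hc', hne, hr⟩)
        · left; rw [hhead] at hr; omega
        · rcases List.mem_cons.1 hc' with rfl | hc'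
          · exact absurd rfl hne
          · have hcnt : (((c :: t).count c' : Int)) = (t.count c' : Int) := by
              simp [Ne.symm hne]
            exact Or.inr ⟨c', hc', hne, by rw [hcnt] at hr; exact hr⟩
    · -- c ≠ p and the list is sorted, so p occurs no more; every later element is ≥ c > p
      have hplt : p < c := lt_of_le_of_ne hpc (fun e => h e.symm)
      have hge : ∀ y ∈ t, c ≤ y := (List.pairwise_cons.1 hct).1
      have hnp : ∀ y ∈ c :: t, y ≠ p := by
        intro y hy
        rcases List.mem_cons.1 hy with rfl | hy
        · exact h
        · exact fun e => absurd (e ▸ hge y hy) (not_le.2 hplt)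
      have hcount0 : (((c :: t).count p : Int)) = 0 := by
        have : (c :: t).count p = 0 := by
          rw [List.count_eq_zero]; intro hp; exact hnp p hp rfl
        rw [this]; rfl
      have hih := ih c 1 hct
      rw [show rlFrom p run (c :: t) = run :: rlFrom c 1 t from by simp [rlFrom, h],
        List.mem_cons, hih]
      constructor
      · rintro (hr | hr | ⟨c', hc', hne, hr⟩)
        · left; rw [hcount0]; omega
        · exact Or.inr ⟨c, List.mem_cons.2 (Or.inl rfl), h, by rw [hhead]; omega⟩
        · have hcnt : (((c :: t).count c' : Int)) = (t.count c' : Int) := by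
            simp [Ne.symm hne]
          exact Or.inr ⟨c', List.mem_cons.2 (Or.inr hc'), hnp c' (List.mem_cons.2 (Or.inr hc')),
            by rw [hcnt]; exact hr⟩
      · rintro (hr | ⟨c', hc', hne, hr⟩)
        · left; rw [hcount0] at hr; omega
        · rcases List.mem_cons.1 hc' with rfl | hc'
          · right; left; rw [hhead] at hr; omega
          · by_cases hcc : c' = c
            · subst hcc; right; left; rw [hhead] at hr; omega
            · have hcnt : (((c :: t).count c' : Int)) = (t.count c' : Int) := by
                simp [Ne.symm hcc]
              exact Or.inr (Or.inr ⟨c', hc', hcc, by rw [hcnt] at hr; exact hr⟩)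

-- B's groups of a sorted list: membership is an existential over counts
theorem mem_groupsB_sorted (s : List Char) (hs : s.Pairwise (· ≤ ·)) (r : Int) :
    r ∈ pvFinishB (s.foldl pvStepB ([], none, 0)) ↔ ∃ c ∈ s, r = (s.count c : Int) := by
  cases s with
  | nil => simp [pvFinishB]
  | cons c t =>
    rw [List.foldl_cons, show pvStepB ([], none, 0) c = ([], some c, 1) from rfl,
      foldB_eq_rlFrom, List.nil_append, mem_rlFrom_sorted t c 1 r hs]
    have hhead : (((c :: t).count c : Int)) = (t.count c : Int) + 1 := by simp
    constructor
    · rintro (h1 | ⟨c', hc', hne, h1⟩)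
      · exact ⟨c, List.mem_cons.2 (Or.inl rfl), by rw [hhead]; omega⟩
      · have hcnt : (((c :: t).count c' : Int)) = (t.count c' : Int) := by
          simp [Ne.symm hne]
        exact ⟨c', List.mem_cons.2 (Or.inr hc'), by rw [hcnt]; exact h1⟩
    · rintro ⟨c', hc', h1⟩
      rcases List.mem_cons.1 hc' with rfl | hc'
      · left; rw [hhead] at h1; omega
      · by_cases hne : c' = c
        · subst hne; left; rw [hhead] at h1; omega
        · have hcnt : (((c :: t).count c' : Int)) = (t.count c' : Int) := by
            simp [Ne.symm hne]
          exact Or.inr ⟨c', hc', hne, by rw [hcnt] at h1; exact h1⟩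

-- B's result as an existential over counts of the original characters
theorem count_boxids_alt_eq (boxid : String) :
    count_boxids_alt boxid =
      ((if ∃ c ∈ boxid.toList, (boxid.toList.count c : Int) = 2 then 1 else 0),
       (if ∃ c ∈ boxid.toList, (boxid.toList.count c : Int) = 3 then 1 else 0)) := by
  have hdef : count_boxids_alt boxid =
      ((if (2 : Int) ∈ pvFinishB
          ((PySem.List.sorted boxid.toList (fun c => c) false).foldl pvStepB ([], none, 0))
        then 1 else 0),
       (if (3 : Int) ∈ pvFinishB
          ((PySem.List.sorted boxid.toList (fun c => c) false).foldl pvStepB ([], none, 0))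
        then 1 else 0)) := rfl
  have hperm : (PySem.List.sorted boxid.toList (fun c => c) false).Perm boxid.toList :=
    PySem.List.sorted_perm _ _ _
  have hsorted : (PySem.List.sorted boxid.toList (fun c => c) false).Pairwise (· ≤ ·) :=
    PySem.List.sorted_pairwise _ _
  have hmem : ∀ (r : Int),
      (r ∈ pvFinishB ((PySem.List.sorted boxid.toList (fun c => c) false).foldl pvStepB ([], none, 0))) ↔
        ∃ c ∈ boxid.toList, (boxid.toList.count c : Int) = r := by
    intro r
    rw [mem_groupsB_sorted _ hsorted r]
    constructor
    · rintro ⟨c, hc, hcr⟩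
      exact ⟨c, hperm.mem_iff.1 hc, by rw [← hperm.count_eq]; omega⟩
    · rintro ⟨c, hc, hcr⟩
      exact ⟨c, hperm.mem_iff.2 hc, by rw [hperm.count_eq]; omega⟩
  rw [hdef, if_congr (hmem 2) rfl rfl, if_congr (hmem 3) rfl rfl]

-- A's result as the same existential
theorem count_boxids_eq (boxid : String) :
    count_boxids boxid =
      ((if ∃ c ∈ boxid.toList, (boxid.toList.count c : Int) = 2 then 1 else 0),
       (if ∃ c ∈ boxid.toList, (boxid.toList.count c : Int) = 3 then 1 else 0)) := by
  have hdef : count_boxids boxid =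
      ((PySem.Dict.counter boxid.toList).keys.foldl
        (fun (acc : Int × Int) k =>
          ((if (PySem.Dict.counter boxid.toList).getD k 0 = 2 then 1 else acc.1),
           (if (PySem.Dict.counter boxid.toList).getD k 0 = 3 then 1 else acc.2))) (0, 0)) := rfl
  rw [hdef, foldA_char _ (fun k => (PySem.Dict.counter boxid.toList).getD k 0)]
  have hk : ∀ k : Char, (PySem.Dict.counter boxid.toList).getD k 0 = (boxid.toList.count k : Int) := by
    intro k; simp [pysem]
  have hmem : ∀ k : Char, k ∈ (PySem.Dict.counter boxid.toList).keys ↔ k ∈ boxid.toList := by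
    intro k; simp [pysem]
  have hiff : ∀ (r : Int), (∃ k ∈ (PySem.Dict.counter boxid.toList).keys,
      (PySem.Dict.counter boxid.toList).getD k 0 = r) ↔
      ∃ c ∈ boxid.toList, (boxid.toList.count c : Int) = r := by
    intro r
    constructor
    · rintro ⟨k, hk1, hk2⟩; exact ⟨k, (hmem k).1 hk1, by rw [← hk k]; exact hk2⟩
    · rintro ⟨k, hk1, hk2⟩; exact ⟨k, (hmem k).2 hk1, by rw [hk k]; exact hk2⟩
  rw [if_congr (hiff 2) rfl rfl, if_congr (hiff 3) rfl rfl]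

-- ===== VERDICT (by name: the statement is the Claim_ definition above) =====
theorem count_boxids_spec : Claim_equal_count_boxids := by
  intro boxid _
  unfold Spec_count_boxids
  rw [count_boxids_eq, count_boxids_alt_eq]
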